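-- pv_equiv track=rewrite | github.com/B-Leach/Symbolic | main.py | format_readable_eq
-- ===== SOURCE A (Python) =====
-- def format_readable_eq(eq):
--     """Convert gplearn equation format to readable infix notation."""
--     eq = str(eq)
--     operation = ""
--
--     for idx, char in enumerate(eq):
--         operation += char
--
--         if char == "(":
--             valid_op = False
--             op = ""
--             match operation[:-1]:
--                 case "add":
--                     op = " + "
--                     valid_op = True
--                 case "mul":
--                     op = " * "
--                     valid_op = True
--                 case "sub":
--                     op = " - "
--                     valid_op = True
--                 case "div":
--                     op = " / "
--                     valid_op = True
--                 case "pow":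
--                     op = " ** "
--                     valid_op = True
--
--             if not valid_op:
--                 return operation + format_readable_eq(eq[idx + 1 : -1]) + ")"
--
--             parenthesis = 0
--             first_exp = ""
--             second_exp = ""
--             assign_to_first = True
--
--             for char_inner in eq[idx + 1 :]:
--                 if char_inner == " ":
--                     continue
--                 elif char_inner == "(":
--                     parenthesis += 1
--                 elif char_inner == ")":
--                     if parenthesis == 0:
--                         break
--                     parenthesis -= 1
--                 elif parenthesis == 0 and char_inner == ",":
--                     assign_to_first = False
--                     continue
--
--                 if assign_to_first:
--                     first_exp += char_inner
--                 else:
--                     second_exp += char_inner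
--
--             return format_readable_eq(first_exp) + op + format_readable_eq(second_exp)
--
--     return operation
-- ===== SOURCE B (Python) =====
-- # B: iterative explicit-stack formatter (recursion replaced by a work stack),
-- # dict op table instead of match, str.find instead of a char-by-char scan.
-- _OPS = {"add": " + ", "mul": " * ", "sub": " - ", "div": " / ", "pow": " ** "}
--
--
-- def _split_args(t):
--     """Split t (spaces already removed) into the two top-level arguments."""
--     parts = ["", ""]
--     k = 0
--     depth = 0
--     for c in t:
--         if c == "(":
--             depth += 1
--         elif c == ")":
--             if depth == 0:
--                 return parts[0], parts[1]
--             depth -= 1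
--         elif c == "," and depth == 0:
--             k = 1
--             continue
--         parts[k] += c
--     return parts[0], parts[1]
--
--
-- def format_readable_eq(eq):
--     """Convert gplearn equation format to readable infix notation."""
--     eq = str(eq)
--     out = []
--     stack = [(True, eq)]  # (needs formatting?, text); top of stack = end
--     while stack:
--         fmt, s = stack.pop()
--         if not fmt:
--             out.append(s)
--             continue
--         j = s.find("(")
--         if j == -1:
--             out.append(s)
--             continue
--         head = s[:j]
--         if head in _OPS:
--             a, b = _split_args("".join(c for c in s[j + 1:] if c != " "))
--             stack.append((True, b))
--             stack.append((False, _OPS[head]))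
--             stack.append((True, a))
--         else:
--             stack.append((False, ")"))
--             stack.append((True, s[j + 1:-1]))
--             stack.append((False, s[:j + 1]))
--     return "".join(out)
-- ===== Notes on version B (the rewrite author's own statement) =====
-- stated objective: alternative
-- what changed: Recursion is replaced by an iterative explicit work stack emitting output pieces into a join buffer; the char-by-char accumulator scan becomes str.find, the match statement becomes a dict table, and argument splitting pre-strips spaces once instead of skipping them per character.
import Mathlib
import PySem

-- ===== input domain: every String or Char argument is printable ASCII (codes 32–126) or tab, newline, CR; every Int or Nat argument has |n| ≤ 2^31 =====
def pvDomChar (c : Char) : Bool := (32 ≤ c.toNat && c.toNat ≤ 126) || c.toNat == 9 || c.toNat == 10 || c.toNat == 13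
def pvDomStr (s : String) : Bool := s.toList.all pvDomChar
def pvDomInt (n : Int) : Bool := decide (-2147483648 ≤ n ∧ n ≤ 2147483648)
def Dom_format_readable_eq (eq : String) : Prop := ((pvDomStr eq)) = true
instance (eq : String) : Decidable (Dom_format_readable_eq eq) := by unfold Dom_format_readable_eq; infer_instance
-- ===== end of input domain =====

-- B replaces A's recursion by an explicit work stack (same return value; neither version mutates its argument).

-- ===== PORT A =====
-- A's inner 'for char_inner in eq[idx+1:]' loop: state (parenthesis, first_exp, second_exp,
-- assign_to_first); early 'break' at a top-level ')' returns the pair.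
def pyScanArgs : List Char → Int → List Char → List Char → Bool → List Char × List Char
  | [], _, f, g, _ => (f, g)
  | c :: t, p, f, g, af =>
    if c = ' ' then pyScanArgs t p f g af
    else if c = '(' then
      if af then pyScanArgs t (p + 1) (f ++ [c]) g af else pyScanArgs t (p + 1) f (g ++ [c]) af
    else if c = ')' then
      if p = 0 then (f, g)
      else if af then pyScanArgs t (p - 1) (f ++ [c]) g af else pyScanArgs t (p - 1) f (g ++ [c]) af
    else if p = 0 ∧ c = ',' then pyScanArgs t p f g false
    else if af then pyScanArgs t p (f ++ [c]) g af else pyScanArgs t p f (g ++ [c]) af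

-- needed by the ports' termination proofs
lemma pyScanArgs_len : ∀ (t : List Char) (p : Int) (f g : List Char) (af : Bool),
    (pyScanArgs t p f g af).1.length + (pyScanArgs t p f g af).2.length
      ≤ f.length + g.length + t.length := by
  intro t
  induction t with
  | nil => intro p f g af; simp [pyScanArgs]
  | cons c t ih =>
    intro p f g af
    simp only [pyScanArgs]
    split_ifs <;>
      first
        | (refine le_trans (ih _ _ _ _) ?_; simp; try omega)
        | (simp; try omega)

-- A's 'match operation[:-1]' block: the matched op string, or none (valid_op = False)
def matchOp (k : List Char) : Option (List Char) :=
  if k = "add".toList then some " + ".toList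
  else if k = "mul".toList then some " * ".toList
  else if k = "sub".toList then some " - ".toList
  else if k = "div".toList then some " / ".toList
  else if k = "pow".toList then some " ** ".toList
  else none

-- A's outer 'for idx, char in enumerate(eq)' loop: op = operation so far, rest = eq[idx+1:]
-- (hence eq[idx+1:-1] = rest.dropLast); recursive calls are formatA.
mutual
def formatA (l : List Char) : List Char := loopA [] l
termination_by 2 * l.length + 1
decreasing_by
  · simp

def loopA : List Char → List Char → List Char
  | op, [] => op
  | op, c :: rest =>
    if c = '(' then
      match matchOp op with
      | some o =>
        formatA (pyScanArgs rest 0 [] [] true).1 ++ o ++ formatA (pyScanArgs rest 0 [] [] true).2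
      | none => (op ++ [c]) ++ formatA rest.dropLast ++ [')']
    else loopA (op ++ [c]) rest
termination_by op rest => 2 * rest.length
decreasing_by
  · have h := pyScanArgs_len rest 0 [] [] true; simp at h ⊢; omega
  · have h := pyScanArgs_len rest 0 [] [] true; simp at h ⊢; omega
  · have h := rest.length_dropLast; simp at h ⊢; omega
  · simp
end

def format_readable_eq (eq : String) : String := String.ofList (formatA eq.toList)

-- ===== PORT B =====
-- Source B: an explicit stack of (needs formatting?, text) tasks, output pieces joined at the end.
inductive TaskB
  | lit : List Char → TaskB
  | fmt : List Char → TaskB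

-- Source B's _split_args (input already space-free): parts index k, depth p
def splitB : List Char → Int → Nat → List Char → List Char → List Char × List Char
  | [], _, _, a, b => (a, b)
  | c :: t, p, k, a, b =>
    if c = '(' then
      if k = 0 then splitB t (p + 1) k (a ++ [c]) b else splitB t (p + 1) k a (b ++ [c])
    else if c = ')' then
      if p = 0 then (a, b)
      else if k = 0 then splitB t (p - 1) k (a ++ [c]) b else splitB t (p - 1) k a (b ++ [c])
    else if c = ',' ∧ p = 0 then splitB t p 1 a b
    else if k = 0 then splitB t p k (a ++ [c]) b else splitB t p k a (b ++ [c])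

-- needed by runB's termination proof
lemma splitB_len : ∀ (t : List Char) (p : Int) (k : Nat) (a b : List Char),
    (splitB t p k a b).1.length + (splitB t p k a b).2.length
      ≤ a.length + b.length + t.length := by
  intro t
  induction t with
  | nil => intro p k a b; simp [splitB]
  | cons c t ih =>
    intro p k a b
    simp only [splitB]
    split_ifs <;>
      first
        | (refine le_trans (ih _ _ _ _) ?_; simp; try omega)
        | (simp; try omega)

-- Source B's _OPS dict
def opsB : List (List Char × List Char) :=
  [("add".toList, " + ".toList), ("mul".toList, " * ".toList), ("sub".toList, " - ".toList),
   ("div".toList, " / ".toList), ("pow".toList, " ** ".toList)]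

def taskW : TaskB → Nat
  | .lit _ => 1
  | .fmt s => 4 * s.length + 2

-- Source B's while loop; stack head = Python list end; s.find("(") ported as findIdx?
-- (none = Python's -1), '"".join(c for c in s[j+1:] if c != " ")' as filter,
-- s[j+1:-1] as (s.drop (j+1)).dropLast.
def runB : List TaskB → List Char → List Char
  | [], out => out
  | .lit s :: st, out => runB st (out ++ s)
  | .fmt s :: st, out =>
    match hf : s.findIdx? (· = '(') with
    | none => runB st (out ++ s)
    | some j =>
      match opsB.lookup (s.take j) with
      | some o =>
        runB (.fmt (splitB ((s.drop (j + 1)).filter (fun c => c ≠ ' ')) 0 0 [] []).1 ::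
              .lit o ::
              .fmt (splitB ((s.drop (j + 1)).filter (fun c => c ≠ ' ')) 0 0 [] []).2 :: st) out
      | none =>
        runB (.lit (s.take (j + 1)) :: .fmt (s.drop (j + 1)).dropLast :: .lit [')'] :: st) out
termination_by st out => (st.map taskW).sum
decreasing_by
  · simp [taskW]
  · simp [taskW]
  · have hj : j < s.length := by
      have := List.findIdx?_eq_some_iff_findIdx_eq.mp hf
      omega
    have h := splitB_len ((s.drop (j + 1)).filter (fun c => c ≠ ' ')) 0 0 [] []
    have h2 := List.length_filter_le (fun c => c ≠ ' ') (s.drop (j + 1))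
    simp [taskW] at h h2 ⊢
    omega
  · have hj : j < s.length := by
      have := List.findIdx?_eq_some_iff_findIdx_eq.mp hf
      omega
    have h := (s.drop (j + 1)).length_dropLast
    simp [taskW] at h ⊢
    omega

def format_readable_eq_alt (eq : String) : String := String.ofList (runB [TaskB.fmt eq.toList] [])

-- ===== PRECONDITION & SPEC =====
def Spec_format_readable_eq (eq : String) (out : String) : Prop := out = format_readable_eq_alt eq
instance (eq : String) (out : String) : Decidable (Spec_format_readable_eq eq out) := by unfold Spec_format_readable_eq; infer_instance

-- ===== CLAIM (what is proved, stated in full; the proofs are below) =====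
def Claim_equal_format_readable_eq : Prop := ∀ (eq : String), Dom_format_readable_eq eq → Spec_format_readable_eq eq (format_readable_eq eq)

-- ===== LEMMAS AND PROOFS =====

-- the value of one step of A, phrased by the position of the first '('
def fmtStep (op rest : List Char) : List Char :=
  (rest.findIdx? (· = '(')).elim (op ++ rest) (fun j =>
    (matchOp (op ++ rest.take j)).elim
      ((op ++ rest.take (j + 1)) ++ formatA ((rest.drop (j + 1)).dropLast) ++ [')'])
      (fun o =>
        formatA (pyScanArgs (rest.drop (j + 1)) 0 [] [] true).1 ++ o ++
          formatA (pyScanArgs (rest.drop (j + 1)) 0 [] [] true).2))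

lemma loopA_eq_fmtStep : ∀ (rest op : List Char), loopA op rest = fmtStep op rest := by
  intro rest
  induction rest with
  | nil => intro op; simp [loopA, fmtStep]
  | cons c rest ih =>
    intro op
    rw [loopA]
    by_cases hc : c = '('
    · subst hc
      simp only [fmtStep, List.findIdx?_cons, decide_true, Option.elim_some, List.take_zero,
        List.append_nil, List.take_succ_cons, List.drop_succ_cons, List.drop_zero, if_pos rfl]
      cases hm : matchOp op <;> simp [hm]
    · rw [if_neg hc, ih]
      unfold fmtStep
      rw [List.findIdx?_cons, if_neg (by simpa using hc)]
      cases hf : rest.findIdx? (· = '(') with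
      | none => simp
      | some j => simp [List.take_succ_cons, List.drop_succ_cons, List.append_assoc]

lemma formatA_eq_fmtStep (s : List Char) : formatA s = fmtStep [] s := by
  rw [formatA, loopA_eq_fmtStep]

lemma formatA_of_none (s : List Char) (hf : s.findIdx? (· = '(') = none) : formatA s = s := by
  rw [formatA_eq_fmtStep]; simp [fmtStep, hf]

lemma formatA_of_op (s : List Char) (j : Nat) (o : List Char)
    (hf : s.findIdx? (· = '(') = some j) (hop : matchOp (s.take j) = some o) :
    formatA s = formatA (pyScanArgs (s.drop (j + 1)) 0 [] [] true).1 ++ o ++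
      formatA (pyScanArgs (s.drop (j + 1)) 0 [] [] true).2 := by
  rw [formatA_eq_fmtStep]
  simp only [fmtStep, hf, Option.elim_some, List.nil_append, hop]

lemma formatA_of_unknown (s : List Char) (j : Nat)
    (hf : s.findIdx? (· = '(') = some j) (hop : matchOp (s.take j) = none) :
    formatA s = s.take (j + 1) ++ formatA ((s.drop (j + 1)).dropLast) ++ [')'] := by
  rw [formatA_eq_fmtStep]
  simp only [fmtStep, hf, Option.elim_some, List.nil_append, hop, Option.elim_none]

lemma lookup_opsB_eq_matchOp (k : List Char) : opsB.lookup k = matchOp k := by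
  unfold opsB matchOp
  by_cases h1 : k = "add".toList
  · simp [List.lookup, h1]
  by_cases h2 : k = "mul".toList
  · simp [List.lookup, h2]
  by_cases h3 : k = "sub".toList
  · simp [List.lookup, h3]
  by_cases h4 : k = "div".toList
  · simp [List.lookup, h4]
  by_cases h5 : k = "pow".toList
  · simp [List.lookup, h5]
  · simp only [List.lookup,
      show (k == "add".toList) = false from beq_eq_false_iff_ne.mpr h1,
      show (k == "mul".toList) = false from beq_eq_false_iff_ne.mpr h2,
      show (k == "sub".toList) = false from beq_eq_false_iff_ne.mpr h3,
      show (k == "div".toList) = false from beq_eq_false_iff_ne.mpr h4,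
      show (k == "pow".toList) = false from beq_eq_false_iff_ne.mpr h5]
    split_ifs <;> simp_all

lemma scan_eq_splitB : ∀ (t : List Char) (p : Int) (f g : List Char) (af : Bool),
    pyScanArgs t p f g af = splitB (t.filter (fun c => c ≠ ' ')) p (if af then 0 else 1) f g := by
  intro t
  induction t with
  | nil => intro p f g af; simp [pyScanArgs, splitB]
  | cons c t ih =>
    intro p f g af
    by_cases hsp : c = ' '
    · subst hsp
      simp only [pyScanArgs, if_pos rfl, List.filter_cons]
      simpa using ih p f g af
    · rw [List.filter_cons, if_pos (by simpa using hsp)]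
      simp only [pyScanArgs, splitB, if_neg hsp]
      cases af <;> split_ifs <;> simp_all <;> omega

def evalT : TaskB → List Char
  | .lit s => s
  | .fmt s => formatA s

lemma runB_eq_flatten : ∀ (n : Nat) (st : List TaskB) (out : List Char),
    (st.map taskW).sum ≤ n → runB st out = out ++ (st.map evalT).flatten := by
  intro n
  induction n with
  | zero =>
    intro st out h
    cases st with
    | nil => simp [runB]
    | cons t st => cases t <;> simp [taskW] at h
  | succ n ih =>
    intro st out h
    match st with
    | [] => simp [runB]
    | .lit s :: st =>
      rw [runB, ih st (out ++ s) (by simp [taskW] at h ⊢; omega)]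
      simp [evalT]
    | .fmt s :: st =>
      rw [runB]
      split
      · -- no '(' in s
        rename_i hf
        rw [ih st (out ++ s) (by simp [taskW] at h ⊢; omega)]
        simp [evalT, formatA_of_none s hf]
      · -- first '(' at index j
        rename_i j hf
        have hj : j < s.length := by
          have := List.findIdx?_eq_some_iff_findIdx_eq.mp hf
          omega
        rw [lookup_opsB_eq_matchOp]
        split
        · rename_i o hop
          have hA := formatA_of_op s j o hf hop
          rw [scan_eq_splitB] at hA
          simp only [if_pos rfl] at hA
          have hsb := splitB_len ((s.drop (j + 1)).filter (fun c => c ≠ ' ')) 0 0 [] []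
          have h2 := List.length_filter_le (fun c => c ≠ ' ') (s.drop (j + 1))
          rw [ih (.fmt _ :: .lit o :: .fmt _ :: st) out
              (by simp [taskW] at h hsb h2 ⊢; omega)]
          simp [evalT, hA, List.append_assoc]
        · rename_i hop
          have hA := formatA_of_unknown s j hf hop
          rw [ih (.lit _ :: .fmt _ :: .lit [')'] :: st) out
              (by have h3 := (s.drop (j + 1)).length_dropLast; simp [taskW] at h h3 ⊢; omega)]
          simp [evalT, hA, List.append_assoc]

-- ===== VERDICT (by name: the statement is the Claim_ definition above) =====
theorem format_readable_eq_spec : Claim_equal_format_readable_eq := by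
  intro eq _
  unfold Spec_format_readable_eq format_readable_eq format_readable_eq_alt
  rw [runB_eq_flatten ((([TaskB.fmt eq.toList]).map taskW).sum) _ _ (le_refl _)]
  simp [evalT]
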